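-- pv_equiv track=rewrite | github.com/Kacper-Cyganik/Bioinformatyka-Projekt | utils.py | squash
-- ===== SOURCE A (Python) =====
-- def squash(arr: list) -> str:
--     """Generates string from list of nucleotides excluding overlaping sequences
--
--     Args:
--         arr (list): list of k-length nucleotides
--
--     Returns:
--         str: string created from list of nucleotides.
--     """
--     result = arr[0]
--     oligosize = len(arr[0])
--     for i in range(0, len(arr)-1):
--         oligo1 = arr[i]
--         oligo2 = arr[i+1]
--         if oligo1 == oligo2:
--             result += oligo2
--         else:
--             for j in range(oligosize-1, 0, -1):
--                 if oligo1[oligosize-j:] == oligo2[:j]: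
--                     result += oligo2[j:]
--                     break
--     return result
--
--     """result = arr[0]
--     for i in range(0, len(arr)-1):
--         oligo1 = arr[i]
--         oligo2 = arr[i+1]
--         matching = 0
--         for j in range(0, len(oligo1)+1):
--             finish = False
--             for k in range(0, matching):
--                 end = oligo1[len(oligo1)-matching+k]
--                 start = oligo2[k]
--                 if (end != start):
--                     finish = True
--                     break
--             if(finish):
--                 break
--             matching += 1
--         matching -= 1
--         result += oligo2[matching:]
--     return result, matching"""
-- ===== SOURCE B (Python) =====
-- def _prefix_function(s):
--     pi = [0] * len(s)
--     j = 0
--     for i in range(1, len(s)):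
--         while j and s[i] != s[j]:
--             j = pi[j - 1]
--         if s[i] == s[j]:
--             j += 1
--         pi[i] = j
--     return pi
--
--
-- def _overlap(prev, cur, k):
--     """Largest j in [1, k-1] with prev[k-j:] == cur[:j], given len(prev) == k.
--     KMP: borders of cur + sep + prev are exactly the suffix-prefix overlaps."""
--     s = cur + "\x00" + prev
--     pi = _prefix_function(s)
--     j = pi[-1]
--     while j > k - 1:
--         j = pi[j - 1]
--     return j
--
--
-- def squash(arr: list) -> str:
--     k = len(arr[0])
--     parts = [arr[0]]
--     for prev, cur in zip(arr, arr[1:]):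
--         if prev == cur:
--             parts.append(cur)
--         elif len(prev) == k and k > 1:
--             # strings whose length differs from len(arr[0]) can never
--             # contribute anything: the slice lengths cannot agree.
--             j = _overlap(prev, cur, k)
--             if j:
--                 parts.append(cur[j:])
--     return "".join(parts)
-- ===== Notes on version B (the rewrite author's own statement) =====
-- stated objective: alternative
-- what changed: Per adjacent pair the largest suffix-prefix overlap is found with a KMP prefix function of cur+sentinel+prev instead of A's descending scan over up to k-1 slice comparisons; pairs whose first string's length differs from len(arr[0]) are skipped outright (their slice lengths can never agree non-trivially), and pieces are collected in a list joined once at the end.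
import Mathlib
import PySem

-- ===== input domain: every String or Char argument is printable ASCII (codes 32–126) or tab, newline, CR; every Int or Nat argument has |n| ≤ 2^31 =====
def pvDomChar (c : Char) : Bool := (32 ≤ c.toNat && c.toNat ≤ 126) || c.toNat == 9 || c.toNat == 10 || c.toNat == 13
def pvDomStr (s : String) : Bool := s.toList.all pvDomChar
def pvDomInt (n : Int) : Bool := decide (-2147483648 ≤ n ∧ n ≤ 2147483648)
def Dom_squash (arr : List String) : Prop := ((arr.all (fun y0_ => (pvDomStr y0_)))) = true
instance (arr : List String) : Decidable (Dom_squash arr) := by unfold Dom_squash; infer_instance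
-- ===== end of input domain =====

-- B replaces A's per-pair descending scan of slice comparisons by a KMP prefix-function
-- overlap computation (objective: alternative — a genuinely different overlap algorithm).


-- ===== PORT A =====
-- inner 'for j in range(oligosize-1, 0, -1): … break' loop: returns the piece appended to result
def squashInner (o1 o2 : List Char) (K : Int) : List Int → List Char
  | [] => []
  | j :: rest =>
      if PySem.List.slice o1 (some (K - j)) none = PySem.List.slice o2 none (some j) then
        PySem.List.slice o2 (some j) none
      else squashInner o1 o2 K rest

def squash (arr : List String) : String :=
  let result := (PySem.List.pyGetD arr 0 "").toList
  let K : Int := (result.length : Int)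
  String.ofList ((PySem.List.pyRange 0 (PySem.List.len arr - 1) 1).foldl (fun res i =>
      let o1 := (PySem.List.pyGetD arr i "").toList
      let o2 := (PySem.List.pyGetD arr (i + 1) "").toList
      if o1 = o2 then res ++ o2
      else res ++ squashInner o1 o2 K (PySem.List.pyRange (K - 1) 0 (-1)))
    result)

-- ===== PORT B =====
-- 'while j and s[i] != s[j]: j = pi[j-1]'  (fuel = entry value of j; it strictly decreases)
def pfChase (pi : List Nat) (s : List Char) (c : Char) : Nat → Nat → Nat
  | 0, j => j
  | fuel + 1, j =>
      if j ≠ 0 ∧ s.getD j ' ' ≠ c then pfChase pi s c fuel (pi.getD (j - 1) 0) else j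

-- _prefix_function(s)
def prefixFun (s : List Char) : List Nat :=
  ((PySem.List.pyRange 1 (PySem.List.len s) 1).foldl (fun (st : List Nat × Nat) i =>
      let c := s.getD i.toNat ' '
      let j1 := pfChase st.1 s c st.2 st.2
      let j2 := if c = s.getD j1 ' ' then j1 + 1 else j1
      (st.1 ++ [j2], j2)) ([0], 0)).1

-- 'while j > k - 1: j = pi[j-1]'
def capChase (pi : List Nat) (k : Nat) : Nat → Nat → Nat
  | 0, j => j
  | fuel + 1, j => if k - 1 < j then capChase pi k fuel (pi.getD (j - 1) 0) else j

-- _overlap(prev, cur, k)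
def overlapB (prev cur : List Char) (k : Nat) : Nat :=
  let s := cur ++ '\x00' :: prev
  let pi := prefixFun s
  let j := PySem.List.pyGetD pi (-1) 0
  capChase pi k j j

def squash_alt (arr : List String) : String :=
  let first := (PySem.List.pyGetD arr 0 "").toList
  let k := first.length
  String.ofList (((arr.zip arr.tail).foldl (fun parts pc =>
      let prev := pc.1.toList
      let cur := pc.2.toList
      if prev = cur then parts ++ [cur]
      else if prev.length = k ∧ 1 < k then
        let j := overlapB prev cur k
        if j ≠ 0 then parts ++ [PySem.List.slice cur (some (j : Int)) none] else parts
      else parts) [first]).flatten)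

-- ===== PRECONDITION & SPEC =====
-- A evaluates arr[0] first: on the empty list it raises IndexError (B raises there too).
def Pre_squash (arr : List String) : Prop := arr ≠ []
instance (arr : List String) : Decidable (Pre_squash arr) := by unfold Pre_squash; infer_instance

def pvWitness_squash : List String := (["ACG", "CGT"])

def Spec_squash (arr : List String) (out : String) : Prop := out = squash_alt arr
instance (arr : List String) (out : String) : Decidable (Spec_squash arr out) := by unfold Spec_squash; infer_instance

-- ===== CLAIM (what is proved, stated in full; the proofs are below) =====
def Claim_equal_squash : Prop := ∀ (arr : List String), Dom_squash arr → Pre_squash arr → Spec_squash arr (squash arr)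

-- ===== LEMMAS AND PROOFS =====

def isBorder (u : List Char) (j : Nat) : Bool := u.take j == u.drop (u.length - j)
def descFind (p : Nat → Bool) (n : Nat) : Option Nat := ((List.range n).reverse).find? p
def mpb (u : List Char) : Nat := (descFind (isBorder u) u.length).getD 0

theorem descFind_succ (p : Nat → Bool) (n : Nat) :
    descFind p (n + 1) = if p n then some n else descFind p n := by
  unfold descFind
  rw [List.range_succ, List.reverse_append]
  cases h : p n <;> simp [h]

theorem descFind_some {p : Nat → Bool} {n m : Nat} (h : descFind p n = some m) :
    p m = true ∧ m < n ∧ ∀ j, j < n → p j = true → j ≤ m := by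
  induction n with
  | zero => simp [descFind] at h
  | succ n ih =>
    rw [descFind_succ] at h
    by_cases hp : p n = true
    · rw [if_pos hp] at h
      obtain rfl : n = m := by injection h
      exact ⟨hp, by omega, fun j hj _ => by omega⟩
    · rw [if_neg hp] at h
      obtain ⟨h1, h2, h3⟩ := ih h
      refine ⟨h1, by omega, fun j hj hpj => ?_⟩
      rcases Nat.lt_or_ge j n with hlt | hge
      · exact h3 j hlt hpj
      · obtain rfl : j = n := by omega
        exact absurd hpj hp

theorem descFind_none {p : Nat → Bool} {n : Nat} (h : descFind p n = none) :
    ∀ j, j < n → p j = false := by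
  induction n with
  | zero => omega
  | succ n ih =>
    rw [descFind_succ] at h
    by_cases hp : p n = true
    · rw [if_pos hp] at h; exact absurd h (by simp)
    · rw [if_neg hp] at h
      intro j hj
      rcases Nat.lt_or_ge j n with hlt | hge
      · exact ih h j hlt
      · obtain rfl : j = n := by omega
        exact Bool.eq_false_iff.mpr hp

theorem descFind_isSome {p : Nat → Bool} {n j : Nat} (hj : j < n) (hp : p j = true) :
    (descFind p n).isSome := by
  cases h : descFind p n with
  | none => exact absurd hp (by rw [descFind_none h j hj]; simp)
  | some m => simp

theorem isBorder_zero (u : List Char) : isBorder u 0 = true := by simp [isBorder]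

theorem isBorder_eq {u : List Char} {j : Nat} :
    isBorder u j = true ↔ u.take j = u.drop (u.length - j) := by simp [isBorder]

theorem mpb_spec (u : List Char) (hu : u ≠ []) :
    isBorder u (mpb u) = true ∧ mpb u < u.length ∧
      ∀ j, j < u.length → isBorder u j = true → j ≤ mpb u := by
  have hlen : 0 < u.length := List.length_pos_iff.mpr hu
  cases h : descFind (isBorder u) u.length with
  | none =>
    have := descFind_isSome hlen (isBorder_zero u)
    rw [h] at this; simp at this
  | some m =>
    have hs := descFind_some h
    simpa [mpb, h] using hs

theorem mpb_take_one (s : List Char) (hs : s ≠ []) : mpb (s.take 1) = 0 := by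
  have h1 : (s.take 1).length = 1 := by
    rw [List.length_take]
    have : 0 < s.length := List.length_pos_iff.mpr hs
    omega
  have hne : s.take 1 ≠ [] := by
    intro h; rw [h] at h1; simp at h1
  have := (mpb_spec _ hne).2.1
  omega

theorem getD_take {s : List Char} {i r : Nat} (h : r < i) (d : Char) :
    (s.take i).getD r d = s.getD r d := by
  simp [List.getD_eq_getElem?_getD, h]

theorem isBorder_append_iff {u : List Char} {a : Char} {j : Nat} (hj1 : 1 ≤ j) (hj : j ≤ u.length) :
    isBorder (u ++ [a]) j = true ↔ isBorder u (j - 1) = true ∧ u.getD (j - 1) ' ' = a := by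
  obtain ⟨m, rfl⟩ : ∃ m, j = m + 1 := ⟨j - 1, by omega⟩
  have hm : m < u.length := by omega
  rw [isBorder_eq, isBorder_eq]
  have hlen : (u ++ [a]).length = u.length + 1 := by simp
  have ht : (u ++ [a]).take (m + 1) = u.take (m + 1) := List.take_append_of_le_length (by omega)
  have harr : u.length + 1 - (m + 1) = u.length - m := by omega
  have hd : (u ++ [a]).drop (u.length - m) = u.drop (u.length - m) ++ [a] :=
    List.drop_append_of_le_length (by omega)
  rw [hlen, ht, harr, hd, List.take_add_one]
  have hu : u[m]? = some u[m] := List.getElem?_eq_getElem hm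
  rw [hu]
  simp only [Option.toList_some, Nat.add_sub_cancel]
  constructor
  · intro h
    obtain ⟨h1, h2⟩ := List.append_singleton_inj.mp h
    exact ⟨h1, by rw [List.getD_eq_getElem?_getD, hu]; exact h2⟩
  · rintro ⟨h1, h2⟩
    rw [List.getD_eq_getElem?_getD, hu] at h2
    simp only [Option.getD_some] at h2
    rw [h1, h2]

theorem isBorder_take_iff {u : List Char} {b j : Nat} (hb : isBorder u b = true)
    (hbl : b ≤ u.length) (hj : j ≤ b) :
    isBorder (u.take b) j = isBorder u j := by
  have hlb : (u.take b).length = b := by rw [List.length_take]; omega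
  have h1 : (u.take b).take j = u.take j := by rw [List.take_take]; congr 1; omega
  rw [isBorder_eq] at hb
  have h2 : (u.take b).drop (b - j) = u.drop (u.length - j) := by
    rw [hb, List.drop_drop]; congr 1; omega
  simp only [isBorder, hlb, h1, h2]

theorem mpb_take_step {u : List Char} {b : Nat} (hb : isBorder u b = true)
    (hbl : b ≤ u.length) (hb0 : 0 < b) :
    isBorder u (mpb (u.take b)) = true ∧ mpb (u.take b) < b ∧
      ∀ j, j < b → isBorder u j = true → j ≤ mpb (u.take b) := by
  have hlb : (u.take b).length = b := by rw [List.length_take]; omega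
  have hne : u.take b ≠ [] := by
    intro h; rw [h] at hlb; simp at hlb; omega
  obtain ⟨h1, h2, h3⟩ := mpb_spec (u.take b) hne
  rw [hlb] at h2
  refine ⟨?_, h2, fun j hj hbj => ?_⟩
  · rw [← isBorder_take_iff hb hbl (by omega)]; exact h1
  · exact h3 j (by omega) (by rw [isBorder_take_iff hb hbl (by omega)]; exact hbj)

theorem pfChase_spec (s : List Char) (i : Nat) (hi : i ≤ s.length) (pi : List Nat)
    (hpi : ∀ m, m < i → pi.getD m 0 = mpb (s.take (m + 1))) (c : Char) :
    ∀ fuel j, j ≤ fuel → j < i → isBorder (s.take i) j = true →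
      isBorder (s.take i) (pfChase pi s c fuel j) = true ∧
      pfChase pi s c fuel j ≤ j ∧
      (pfChase pi s c fuel j = 0 ∨ s.getD (pfChase pi s c fuel j) ' ' = c) ∧
      ∀ b, b ≤ j → isBorder (s.take i) b = true → s.getD b ' ' = c →
        b ≤ pfChase pi s c fuel j := by
  intro fuel
  induction fuel with
  | zero =>
    intro j hj hji hb
    obtain rfl : j = 0 := by omega
    refine ⟨hb, Nat.le_refl _, Or.inl rfl, fun b hb0 _ _ => hb0⟩
  | succ fuel ih =>
    intro j hj hji hb
    have hleni : (s.take i).length = i := by rw [List.length_take]; omega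
    by_cases hc : j ≠ 0 ∧ s.getD j ' ' ≠ c
    · have hrw : pfChase pi s c (fuel + 1) j = pfChase pi s c fuel (pi.getD (j - 1) 0) := by
        rw [pfChase, if_pos hc]
      obtain ⟨hc1, hc2⟩ := hc
      have hj1 : j - 1 < i := by omega
      have hj'd : pi.getD (j - 1) 0 = mpb (s.take j) := by
        have hjj : j - 1 + 1 = j := by omega
        rw [hpi (j - 1) hj1, hjj]
      have htt : (s.take i).take j = s.take j := by rw [List.take_take]; congr 1; omega
      have hjle : j ≤ (s.take i).length := by omega
      have hj0 : 0 < j := by omega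
      have hstep := mpb_take_step (u := s.take i) (b := j) hb hjle hj0
      rw [htt] at hstep
      obtain ⟨hb', hlt', hmax'⟩ := hstep
      rw [← hj'd] at hb' hlt' hmax'
      have hfa : pi.getD (j - 1) 0 ≤ fuel := by omega
      have hfb : pi.getD (j - 1) 0 < i := by omega
      obtain ⟨hres1, hres2, hres3, hres4⟩ := ih (pi.getD (j - 1) 0) hfa hfb hb'
      rw [hrw]
      refine ⟨hres1, by omega, hres3, ?_⟩
      intro b hbj hbb hbc
      rcases Nat.lt_or_ge b j with hlt | hge
      · exact hres4 b (hmax' b hlt hbb) hbb hbc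
      · obtain rfl : b = j := by omega
        exact absurd hbc hc2
    · have hrw : pfChase pi s c (fuel + 1) j = j := by rw [pfChase, if_neg hc]
      rw [hrw]
      refine ⟨hb, Nat.le_refl _, ?_, fun b hb1 _ _ => hb1⟩
      by_cases h0 : j = 0
      · exact Or.inl h0
      · rcases not_and_or.mp hc with h | h
        · exact absurd h0 (by simpa using h)
        · exact Or.inr (by simpa using h)

theorem mpb_succ (s : List Char) (i : Nat) (h1 : 1 ≤ i) (hi : i < s.length) (r : Nat)
    (hrb : isBorder (s.take i) r = true) (hrlt : r < i)
    (hrstop : r = 0 ∨ s.getD r ' ' = s.getD i ' ')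
    (hrmax : ∀ b, b ≤ mpb (s.take i) → isBorder (s.take i) b = true →
      s.getD b ' ' = s.getD i ' ' → b ≤ r) :
    mpb (s.take (i + 1)) = if s.getD i ' ' = s.getD r ' ' then r + 1 else r := by
  have hleni : (s.take i).length = i := by rw [List.length_take]; omega
  have hsi : s[i]? = some s[i] := List.getElem?_eq_getElem hi
  have hgi : s.getD i ' ' = s[i] := by rw [List.getD_eq_getElem?_getD, hsi]; rfl
  have hsucc : s.take (i + 1) = s.take i ++ [s[i]] := by
    rw [List.take_add_one, hsi]; rfl
  have hlensucc : (s.take (i + 1)).length = i + 1 := by rw [List.length_take]; omega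
  have hne : s.take (i + 1) ≠ [] := by
    intro h; rw [h] at hlensucc; simp at hlensucc
  obtain ⟨hMb, hMlt, hMmax⟩ := mpb_spec (s.take (i + 1)) hne
  rw [hlensucc] at hMlt hMmax
  set M := mpb (s.take (i + 1)) with hM
  -- every u-border bound and getD facts
  have humax := (mpb_spec (s.take i) (by intro h; rw [h] at hleni; simp at hleni; omega)).2.2
  rw [hleni] at humax
  by_cases hcc : s.getD i ' ' = s.getD r ' '
  · rw [if_pos hcc]
    -- r + 1 is a border of take (i+1)
    have hr1 : isBorder (s.take (i + 1)) (r + 1) = true := by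
      rw [hsucc]
      rw [isBorder_append_iff (by omega) (by omega)]
      refine ⟨by simpa using hrb, ?_⟩
      simp only [Nat.add_sub_cancel]
      rw [getD_take hrlt]
      rw [← hgi, hcc]
    have hle1 : r + 1 ≤ M := hMmax (r + 1) (by omega) hr1
    -- M ≤ r + 1
    have hge1 : M ≤ r + 1 := by
      have hM1 : 1 ≤ M := by omega
      rw [hsucc, isBorder_append_iff hM1 (by omega)] at hMb
      obtain ⟨hMb', hMg⟩ := hMb
      have hMle : M - 1 ≤ mpb (s.take i) := humax (M - 1) (by omega) hMb'
      have : M - 1 ≤ r := by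
        apply hrmax (M - 1) hMle hMb'
        rw [← getD_take (show M - 1 < i by omega) (d := ' ')]
        rw [hMg, hgi]
      omega
    omega
  · rw [if_neg hcc]
    obtain rfl : r = 0 := by
      rcases hrstop with h | h
      · exact h
      · exact absurd h.symm hcc
    by_contra hMne
    have hM1 : 1 ≤ M := by omega
    rw [hsucc, isBorder_append_iff hM1 (by omega)] at hMb
    obtain ⟨hMb', hMg⟩ := hMb
    have hMle : M - 1 ≤ mpb (s.take i) := humax (M - 1) (by omega) hMb'
    have hM0 : M - 1 ≤ 0 := by
      apply hrmax (M - 1) hMle hMb'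
      rw [← getD_take (show M - 1 < i by omega) (d := ' ')]
      rw [hMg, hgi]
    obtain hM1' : M = 1 := by omega
    rw [hM1'] at hMg
    simp only [Nat.sub_self] at hMg
    -- hMg : (s.take i).getD 0 ' ' = s[i]
    have : s.getD 0 ' ' = s[i] := by rw [← getD_take (show 0 < i by omega) (d := ' ')]; exact hMg
    apply hcc
    rw [hgi, this]

theorem prefixFun_spec (s : List Char) (hs : s ≠ []) :
    prefixFun s = (List.range s.length).map (fun m => mpb (s.take (m + 1))) := by
  have hn : 0 < s.length := List.length_pos_iff.mpr hs
  unfold prefixFun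
  rw [PySem.List.len_eq, PySem.List.pyRange_one, List.foldl_map]
  have htn : ((s.length : Int) - 1).toNat = s.length - 1 := by omega
  rw [htn]
  have key : ∀ t, t ≤ s.length - 1 →
      (List.range t).foldl (fun (st : List Nat × Nat) (n : Nat) =>
        (fun (st : List Nat × Nat) (i : Int) =>
          let c := s.getD i.toNat ' '
          let j1 := pfChase st.1 s c st.2 st.2
          let j2 := if c = s.getD j1 ' ' then j1 + 1 else j1
          (st.1 ++ [j2], j2)) st ((1 : Int) + (n : Int))) ([0], 0) =
      ((List.range (t + 1)).map (fun m => mpb (s.take (m + 1))), mpb (s.take (t + 1))) := by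
    intro t
    induction t with
    | zero =>
      intro _
      simp [List.range_one, mpb_take_one s hs]
    | succ t iht =>
      intro ht
      rw [List.range_succ, List.foldl_append, iht (by omega)]
      simp only [List.foldl_cons, List.foldl_nil]
      have hiN : ((1 : Int) + (t : Int)).toNat = t + 1 := by omega
      rw [hiN]
      set iN := t + 1 with hiNdef
      have hilt : iN < s.length := by omega
      have hile : iN ≤ s.length := by omega
      -- invariant for the pi list built so far
      have hpi : ∀ m, m < iN → ((List.range (t + 1)).map (fun m => mpb (s.take (m + 1)))).getD m 0
          = mpb (s.take (m + 1)) :=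
        fun m hm => PySem.List.getD_map_range _ _ _ _ hm
      have hleni : (s.take iN).length = iN := by rw [List.length_take]; omega
      have hune : s.take iN ≠ [] := by
        intro h; rw [h] at hleni; simp at hleni
      obtain ⟨hub, hult, humax⟩ := mpb_spec (s.take iN) hune
      rw [hleni] at hult humax
      set c := s.getD iN ' ' with hcdef
      obtain ⟨hr1, hr2, hr3, hr4⟩ := pfChase_spec s iN hile _ hpi c (mpb (s.take iN))
        (mpb (s.take iN)) (Nat.le_refl _) hult hub
      set r := pfChase ((List.range (t + 1)).map (fun m => mpb (s.take (m + 1)))) s c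
        (mpb (s.take iN)) (mpb (s.take iN)) with hrdef
      have hstop : r = 0 ∨ s.getD r ' ' = c := hr3
      have hmpbsucc := mpb_succ s iN (by omega) hilt r hr1 (by omega) hstop
        (fun b hb1 hb2 hb3 => hr4 b hb1 hb2 hb3)
      have h2 : (if c = s.getD r ' ' then r + 1 else r) = mpb (s.take (iN + 1)) := by
        rw [hmpbsucc]
      rw [h2, List.range_succ (n := iN), List.map_append]
      rfl
  have := key (s.length - 1) (Nat.le_refl _)
  rw [this]
  have : s.length - 1 + 1 = s.length := by omega
  rw [this]

theorem capChase_spec (s : List Char) (k : Nat) (pi : List Nat)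
    (hpi : ∀ m, m < s.length → pi.getD m 0 = mpb (s.take (m + 1))) :
    ∀ fuel j, j ≤ fuel → j < s.length → isBorder s j = true →
      isBorder s (capChase pi k fuel j) = true ∧
      capChase pi k fuel j ≤ k - 1 ∧
      ∀ b, b ≤ j → isBorder s b = true → b ≤ k - 1 → b ≤ capChase pi k fuel j := by
  intro fuel
  induction fuel with
  | zero =>
    intro j hj hjl hb
    obtain rfl : j = 0 := by omega
    exact ⟨hb, Nat.zero_le _, fun b hb0 _ _ => by omega⟩
  | succ fuel ih =>
    intro j hj hjl hb
    by_cases hcond : k - 1 < j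
    · have hrw : capChase pi k (fuel + 1) j = capChase pi k fuel (pi.getD (j - 1) 0) := by
        rw [capChase, if_pos hcond]
      have hj1 : j - 1 < s.length := by omega
      have hjj : j - 1 + 1 = j := by omega
      have hj'd : pi.getD (j - 1) 0 = mpb (s.take j) := by rw [hpi (j - 1) hj1, hjj]
      obtain ⟨hb', hlt', hmax'⟩ := mpb_take_step (u := s) (b := j) hb (by omega) (by omega)
      rw [← hj'd] at hb' hlt' hmax'
      obtain ⟨hres1, hres2, hres3⟩ := ih (pi.getD (j - 1) 0) (by omega) (by omega) hb'
      rw [hrw]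
      refine ⟨hres1, hres2, ?_⟩
      intro b hbj hbb hbk
      exact hres3 b (hmax' b (by omega) hbb) hbb hbk
    · have hrw : capChase pi k (fuel + 1) j = j := by rw [capChase, if_neg hcond]
      rw [hrw]
      exact ⟨hb, by omega, fun b hb0 _ _ => hb0⟩

theorem overlapB_eq (prev cur : List Char) (k : Nat) (hk : 2 ≤ k) (hlen : prev.length = k) :
    overlapB prev cur k =
      (descFind (fun j => decide (1 ≤ j) && isBorder (cur ++ '\x00' :: prev) j) k).getD 0 := by
  set s := cur ++ '\x00' :: prev with hsdef
  have hslen : s.length = cur.length + 1 + k := by simp [hsdef, hlen]; omega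
  have hs0 : 0 < s.length := by omega
  have hsne : s ≠ [] := by intro h; rw [h] at hs0; simp at hs0
  have hpf := prefixFun_spec s hsne
  have hpilen : (prefixFun s).length = s.length := by rw [hpf]; simp
  have hpine : prefixFun s ≠ [] := by
    intro h; rw [h] at hpilen; simp at hpilen; omega
  have hpi : ∀ m, m < s.length → (prefixFun s).getD m 0 = mpb (s.take (m + 1)) := by
    intro m hm; rw [hpf]; exact PySem.List.getD_map_range _ _ _ _ hm
  have hlast : PySem.List.pyGetD (prefixFun s) (-1) 0 = mpb s := by
    rw [PySem.List.pyGetD_neg_ofNat (prefixFun s) 1 0 (by omega) (by omega)]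
    have h1 : (prefixFun s)[(prefixFun s).length - 1]? = some (mpb s) := by
      rw [hpilen, hpf]
      have hlt : s.length - 1 < s.length := by omega
      simp [hlt]
      rw [show s.length - 1 + 1 = s.length by omega, List.take_length]
    rw [List.getElem?_eq_getElem (by omega)] at h1
    exact Option.some.inj h1
  obtain ⟨hMb, hMlt, hMmax⟩ := mpb_spec s hsne
  show capChase (prefixFun s) k (PySem.List.pyGetD (prefixFun s) (-1) 0)
        (PySem.List.pyGetD (prefixFun s) (-1) 0) = _
  rw [hlast]
  obtain ⟨hr1, hr2, hr3⟩ := capChase_spec s k (prefixFun s) hpi (mpb s) (mpb s)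
    (Nat.le_refl _) hMlt hMb
  set r := capChase (prefixFun s) k (mpb s) (mpb s) with hrdef
  cases hd : descFind (fun j => decide (1 ≤ j) && isBorder s j) k with
  | none =>
    have hnone := descFind_none hd
    simp only [Option.getD_none]
    by_contra hr0
    have hrk : r < k := by omega
    have hfalse := hnone r hrk
    have hdec : decide (1 ≤ r) = true := by simp; omega
    rw [hdec, hr1] at hfalse
    simp at hfalse
  | some m =>
    obtain ⟨hpm, hmk, hmmax⟩ := descFind_some hd
    rw [Bool.and_eq_true, decide_eq_true_iff] at hpm
    obtain ⟨hm1, hmb⟩ := hpm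
    simp only [Option.getD_some]
    have hmlt : m < s.length := by omega
    have hmj0 : m ≤ mpb s := hMmax m hmlt hmb
    have hmr : m ≤ r := hr3 m hmj0 hmb (by omega)
    have hrm : r ≤ m := by
      have hr0 : 1 ≤ r := by omega
      exact hmmax r (by omega) (by rw [Bool.and_eq_true, decide_eq_true_iff]; exact ⟨hr0, hr1⟩)
    omega

theorem isBorder_sep_iff (prev cur : List Char) (hsp : '\x00' ∉ prev) (hsc : '\x00' ∉ cur)
    {j : Nat} (_hj1 : 1 ≤ j) (hjlt : j < (cur ++ '\x00' :: prev).length) :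
    isBorder (cur ++ '\x00' :: prev) j = true ↔
      j ≤ cur.length ∧ j ≤ prev.length ∧ cur.take j = prev.drop (prev.length - j) := by
  have hslen : (cur ++ '\x00' :: prev).length = cur.length + 1 + prev.length := by
    simp; omega
  have hget_sep : (cur ++ '\x00' :: prev)[cur.length]? = some '\x00' := by
    rw [List.getElem?_append_right (Nat.le_refl _)]
    simp
  have hnosep : ∀ m, m ≠ cur.length → (cur ++ '\x00' :: prev)[m]? ≠ some '\x00' := by
    intro m hm hcontra
    rcases Nat.lt_or_ge m cur.length with hlt | hge
    · rw [List.getElem?_append_left hlt] at hcontra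
      exact hsc (List.mem_of_getElem? hcontra)
    · have hgt : cur.length < m := by omega
      have hm' : m = cur.length + (m - cur.length - 1 + 1) := by omega
      rw [hm', List.getElem?_append_right (by omega)] at hcontra
      rw [show cur.length + (m - cur.length - 1 + 1) - cur.length = m - cur.length - 1 + 1 by omega] at hcontra
      rw [List.getElem?_cons_succ] at hcontra
      exact hsp (List.mem_of_getElem? hcontra)
  rw [isBorder_eq]
  constructor
  · intro hb
    have hj2 : j ≤ cur.length := by
      by_contra hgt
      have hgt' : cur.length < j := by omega
      have ev := congrArg (fun l => l[cur.length]?) hb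
      simp only [List.getElem?_take, List.getElem?_drop] at ev
      rw [if_pos hgt', hget_sep] at ev
      have hne : (cur ++ '\x00' :: prev).length - j + cur.length ≠ cur.length := by omega
      exact absurd ev.symm (hnosep _ hne)
    have hj3 : j ≤ prev.length := by
      by_contra hgt
      have hgt' : prev.length < j := by omega
      have ev := congrArg (fun l => l[j - prev.length - 1]?) hb
      simp only [List.getElem?_take, List.getElem?_drop] at ev
      rw [if_pos (show j - prev.length - 1 < j by omega)] at ev
      rw [show (cur ++ '\x00' :: prev).length - j + (j - prev.length - 1) = cur.length from by omega] at ev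
      rw [hget_sep] at ev
      rw [List.getElem?_append_left (show j - prev.length - 1 < cur.length by omega)] at ev
      exact hsc (List.mem_of_getElem? ev)
    refine ⟨hj2, hj3, ?_⟩
    have htake : (cur ++ '\x00' :: prev).take j = cur.take j :=
      List.take_append_of_le_length hj2
    have hdrop : (cur ++ '\x00' :: prev).drop ((cur ++ '\x00' :: prev).length - j) =
        prev.drop (prev.length - j) := by
      have hassoc : (cur ++ '\x00' :: prev) = (cur ++ ['\x00']) ++ prev := by simp
      rw [hassoc]
      rw [show ((cur ++ ['\x00']) ++ prev).length - j = (cur ++ ['\x00']).length + (prev.length - j)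
        from by simp; omega]
      exact List.drop_length_add_append _
    rw [htake, hdrop] at hb
    exact hb
  · rintro ⟨hj2, hj3, hEq⟩
    have htake : (cur ++ '\x00' :: prev).take j = cur.take j :=
      List.take_append_of_le_length hj2
    have hdrop : (cur ++ '\x00' :: prev).drop ((cur ++ '\x00' :: prev).length - j) =
        prev.drop (prev.length - j) := by
      have hassoc : (cur ++ '\x00' :: prev) = (cur ++ ['\x00']) ++ prev := by simp
      rw [hassoc]
      rw [show ((cur ++ ['\x00']) ++ prev).length - j = (cur ++ ['\x00']).length + (prev.length - j)
        from by simp; omega]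
      exact List.drop_length_add_append _
    rw [htake, hdrop]
    exact hEq

theorem Acond_iff (o1 o2 : List Char) (k : Nat) (hlen : o1.length = k)
    (hsp : '\x00' ∉ o1) (hsc : '\x00' ∉ o2) {j : Nat} (hj1 : 1 ≤ j) (hjk : j ≤ k - 1)
    (hk : 2 ≤ k) :
    (PySem.List.slice o1 (some ((k : Int) - (j : Int))) none =
        PySem.List.slice o2 none (some (j : Int))) ↔
      isBorder (o2 ++ '\x00' :: o1) j = true := by
  have h1 : (k : Int) - (j : Int) = ((k - j : Nat) : Int) := by omega
  rw [h1, PySem.List.slice_from_natCast, PySem.List.slice_to_natCast]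
  rw [isBorder_sep_iff o1 o2 hsp hsc hj1 (by simp [hlen]; omega)]
  rw [hlen]
  constructor
  · intro heq
    have hLen := congrArg List.length heq
    simp only [List.length_drop, List.length_take, hlen] at hLen
    refine ⟨by omega, by omega, heq.symm⟩
  · rintro ⟨_, _, h3⟩
    exact h3.symm

theorem squashInner_eq (o1 o2 : List Char) (k : Nat) (hk : 2 ≤ k) (hlen : o1.length = k)
    (hsp : '\x00' ∉ o1) (hsc : '\x00' ∉ o2) :
    ∀ a : Nat, a ≤ k - 1 →
      squashInner o1 o2 (k : Int) (PySem.List.pyRange (a : Int) 0 (-1)) =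
        match descFind (fun j => decide (1 ≤ j) && isBorder (o2 ++ '\x00' :: o1) j) (a + 1) with
        | some j => PySem.List.slice o2 (some (j : Int)) none
        | none => [] := by
  intro a
  induction a with
  | zero =>
    intro _
    rw [PySem.List.pyRange_neg_one_eq_nil (by simp)]
    have hnone : descFind (fun j => decide (1 ≤ j) && isBorder (o2 ++ '\x00' :: o1) j) 1 = none := by
      rw [show (1 : Nat) = 0 + 1 from rfl, descFind_succ]
      simp [descFind]
    rw [hnone]
    simp [squashInner]
  | succ a ih =>
    intro ha
    have hcons : PySem.List.pyRange ((a + 1 : Nat) : Int) 0 (-1) =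
        ((a + 1 : Nat) : Int) :: PySem.List.pyRange ((a : Nat) : Int) 0 (-1) := by
      have hstep : ((a + 1 : Nat) : Int) - 1 = ((a : Nat) : Int) := by push_cast; ring
      rw [PySem.List.pyRange_neg_one_cons (by exact_mod_cast Nat.succ_pos a), hstep]
    rw [hcons]
    simp only [squashInner]
    rw [descFind_succ]
    have hiff := Acond_iff o1 o2 k hlen hsp hsc (j := a + 1) (by omega) (by omega) hk
    have hp : (decide (1 ≤ a + 1) && isBorder (o2 ++ '\x00' :: o1) (a + 1)) =
        isBorder (o2 ++ '\x00' :: o1) (a + 1) := by simp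
    rw [hp]
    by_cases hcc : isBorder (o2 ++ '\x00' :: o1) (a + 1) = true
    · rw [if_pos (hiff.mpr hcc), hcc]
      simp
    · have hcc' : isBorder (o2 ++ '\x00' :: o1) (a + 1) = false := by
        cases h : isBorder (o2 ++ '\x00' :: o1) (a + 1)
        · rfl
        · exact absurd h hcc
      rw [if_neg (fun h => hcc (hiff.mp h)), hcc']
      simp only [Bool.false_eq_true, if_false]
      exact ih (by omega)

theorem squashInner_nil_of_len_ne (o1 o2 : List Char) (k : Nat) (hne : o1.length ≠ k) :
    ∀ l : List Int, (∀ j ∈ l, 1 ≤ j ∧ j ≤ (k : Int) - 1) →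
      squashInner o1 o2 (k : Int) l = [] := by
  intro l
  induction l with
  | nil => intro _; simp [squashInner]
  | cons j rest ih =>
    intro h
    obtain ⟨hj1, hjk⟩ := h j (List.mem_cons_self ..)
    simp only [squashInner]
    by_cases hc : PySem.List.slice o1 (some ((k : Int) - j)) none =
        PySem.List.slice o2 none (some j)
    · rw [if_pos hc]
      have h0j : (0 : Int) ≤ j := by omega
      have hkj : (0 : Int) ≤ (k : Int) - j := by omega
      rw [PySem.List.slice_from _ h0j]
      rw [PySem.List.slice_from _ hkj, PySem.List.slice_to _ h0j] at hc
      have hLen := congrArg List.length hc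
      simp only [List.length_drop, List.length_take] at hLen
      rw [List.drop_eq_nil_iff]
      omega
    · rw [if_neg hc]
      exact ih (fun j hj => h j (List.mem_cons_of_mem _ hj))

def pieceA (o1 o2 : List Char) (K : Int) : List Char :=
  if o1 = o2 then o2 else squashInner o1 o2 K (PySem.List.pyRange (K - 1) 0 (-1))

def pieceB (o1 o2 : List Char) (k : Nat) : List (List Char) :=
  if o1 = o2 then [o2]
  else if o1.length = k ∧ 1 < k then
    (if overlapB o1 o2 k ≠ 0 then
      [PySem.List.slice o2 (some ((overlapB o1 o2 k : Nat) : Int)) none]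
    else [])
  else []

theorem piece_eq (o1 o2 : List Char) (k : Nat) (hsp : '\x00' ∉ o1) (hsc : '\x00' ∉ o2) :
    pieceA o1 o2 (k : Int) = (pieceB o1 o2 k).flatten := by
  unfold pieceA pieceB
  by_cases heq : o1 = o2
  · rw [if_pos heq, if_pos heq]; simp
  · rw [if_neg heq, if_neg heq]
    by_cases hk : 2 ≤ k
    · by_cases hL : o1.length = k
      · rw [if_pos ⟨hL, by omega⟩]
        have hcast : ((k : Int) - 1) = ((k - 1 : Nat) : Int) := by omega
        rw [hcast]
        have hinner := squashInner_eq o1 o2 k hk hL hsp hsc (k - 1) (Nat.le_refl _)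
        rw [hinner]
        rw [show k - 1 + 1 = k from by omega]
        rw [overlapB_eq o1 o2 k hk hL]
        cases hD : descFind (fun j => decide (1 ≤ j) && isBorder (o2 ++ '\x00' :: o1) j) k with
        | none => simp
        | some m =>
          obtain ⟨hpm, _, _⟩ := descFind_some hD
          rw [Bool.and_eq_true, decide_eq_true_iff] at hpm
          have hm0 : m ≠ 0 := by omega
          simp only [Option.getD_some]
          rw [if_pos hm0]
          simp
      · rw [if_neg (by intro hcon; exact hL hcon.1)]
        rw [List.flatten_nil]
        apply squashInner_nil_of_len_ne o1 o2 k hL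
        intro j hj
        rw [PySem.List.mem_pyRange_neg_one] at hj
        omega
    · rw [if_neg (by intro hcon; omega)]
      rw [PySem.List.pyRange_neg_one_eq_nil (by omega)]
      simp [squashInner]

theorem no_nul_of_dom {arr : List String} (hd : Dom_squash arr) {x : String} (hx : x ∈ arr) :
    '\x00' ∉ x.toList := by
  intro hc
  unfold Dom_squash at hd
  rw [List.all_eq_true] at hd
  have h1 := hd x hx
  unfold pvDomStr at h1
  rw [List.all_eq_true] at h1
  have h2 := h1 _ hc
  exact absurd h2 (by decide)

theorem flatten_flatMap {α : Type} (l : List α) (g : α → List (List Char)) :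
    (l.flatMap g).flatten = l.flatMap (fun x => (g x).flatten) := by
  induction l with
  | nil => rfl
  | cons x xs ih => simp [List.flatMap_cons, List.flatten_append, ih]

theorem range_pair (l : List String) :
    (List.range (l.length - 1)).map (fun n => (l.getD n "", l.getD (n + 1) "")) =
      l.zip l.tail := by
  induction l with
  | nil => simp
  | cons x xs ih =>
    cases xs with
    | nil => simp
    | cons y t =>
      have h1 : (x :: y :: t).length - 1 = ((y :: t).length - 1) + 1 := by simp
      rw [h1, List.range_succ_eq_map, List.map_cons, List.map_map]
      show _ :: _ = (x, y) :: (y :: t).zip t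
      exact congrArg₂ List.cons rfl ih

theorem squash_eq_flat (arr : List String) :
    squash arr = String.ofList ((PySem.List.pyGetD arr 0 "").toList ++
      (arr.zip arr.tail).flatMap (fun pc =>
        pieceA pc.1.toList pc.2.toList ((PySem.List.pyGetD arr 0 "").toList.length : Int))) := by
  have hfold : ∀ (l : List Int) (init : List Char),
      l.foldl (fun res i =>
        if (PySem.List.pyGetD arr i "").toList = (PySem.List.pyGetD arr (i + 1) "").toList
        then res ++ (PySem.List.pyGetD arr (i + 1) "").toList
        else res ++ squashInner (PySem.List.pyGetD arr i "").toList
          (PySem.List.pyGetD arr (i + 1) "").toList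
          ((PySem.List.pyGetD arr 0 "").toList.length : Int)
          (PySem.List.pyRange (((PySem.List.pyGetD arr 0 "").toList.length : Int) - 1) 0 (-1))) init
      = init ++ l.flatMap (fun i => pieceA (PySem.List.pyGetD arr i "").toList
          (PySem.List.pyGetD arr (i + 1) "").toList
          ((PySem.List.pyGetD arr 0 "").toList.length : Int)) := by
    intro l
    induction l with
    | nil => intro init; simp
    | cons i rest ih =>
      intro init
      rw [List.foldl_cons, List.flatMap_cons]
      by_cases h : (PySem.List.pyGetD arr i "").toList = (PySem.List.pyGetD arr (i + 1) "").toList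
      · rw [if_pos h, ih]
        have hpa : pieceA (PySem.List.pyGetD arr i "").toList
            (PySem.List.pyGetD arr (i + 1) "").toList
            ((PySem.List.pyGetD arr 0 "").toList.length : Int)
            = (PySem.List.pyGetD arr (i + 1) "").toList := by
          unfold pieceA; rw [if_pos h]
        rw [hpa, List.append_assoc]
      · rw [if_neg h, ih]
        have hpa : pieceA (PySem.List.pyGetD arr i "").toList
            (PySem.List.pyGetD arr (i + 1) "").toList
            ((PySem.List.pyGetD arr 0 "").toList.length : Int)
            = squashInner (PySem.List.pyGetD arr i "").toList
              (PySem.List.pyGetD arr (i + 1) "").toList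
              ((PySem.List.pyGetD arr 0 "").toList.length : Int)
              (PySem.List.pyRange (((PySem.List.pyGetD arr 0 "").toList.length : Int) - 1) 0 (-1)) := by
          unfold pieceA; rw [if_neg h]
        rw [hpa, List.append_assoc]
  simp only [squash]
  rw [hfold]
  refine congrArg (fun t => String.ofList ((PySem.List.pyGetD arr 0 "").toList ++ t)) ?_
  rw [← range_pair arr, List.flatMap_map]
  rw [PySem.List.len_eq, PySem.List.pyRange_one]
  rw [List.flatMap_map]
  rw [show ((arr.length : Int) - 1 - 0).toNat = arr.length - 1 from by omega]
  rw [List.flatMap_def, List.flatMap_def]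
  refine congrArg List.flatten (List.map_congr_left ?_)
  intro n hn
  have e1 : (0 : Int) + (n : Int) = ((n : Nat) : Int) := by omega
  rw [e1, PySem.List.pyGetD_natCast]
  have e2 : ((n : Nat) : Int) + 1 = (((n + 1 : Nat)) : Int) := by omega
  rw [e2, PySem.List.pyGetD_natCast]

theorem squash_alt_eq_flat (arr : List String) :
    squash_alt arr = String.ofList ((PySem.List.pyGetD arr 0 "").toList ++
      (arr.zip arr.tail).flatMap (fun pc =>
        (pieceB pc.1.toList pc.2.toList (PySem.List.pyGetD arr 0 "").toList.length).flatten)) := by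
  have hfold : ∀ (l : List (String × String)) (init : List (List Char)),
      l.foldl (fun parts pc =>
        if pc.1.toList = pc.2.toList then parts ++ [pc.2.toList]
        else if pc.1.toList.length = (PySem.List.pyGetD arr 0 "").toList.length ∧
            1 < (PySem.List.pyGetD arr 0 "").toList.length then
          (if overlapB pc.1.toList pc.2.toList (PySem.List.pyGetD arr 0 "").toList.length ≠ 0 then
            parts ++ [PySem.List.slice pc.2.toList
              (some ((overlapB pc.1.toList pc.2.toList
                (PySem.List.pyGetD arr 0 "").toList.length : Nat) : Int)) none]
          else parts)
        else parts) init
      = init ++ l.flatMap (fun pc =>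
          pieceB pc.1.toList pc.2.toList (PySem.List.pyGetD arr 0 "").toList.length) := by
    intro l
    induction l with
    | nil => intro init; simp
    | cons pc rest ih =>
      intro init
      rw [List.foldl_cons, List.flatMap_cons]
      by_cases h1 : pc.1.toList = pc.2.toList
      · rw [if_pos h1, ih]
        have hpb : pieceB pc.1.toList pc.2.toList (PySem.List.pyGetD arr 0 "").toList.length
            = [pc.2.toList] := by
          unfold pieceB; rw [if_pos h1]
        rw [hpb, List.append_assoc]
      · rw [if_neg h1]
        by_cases h2 : pc.1.toList.length = (PySem.List.pyGetD arr 0 "").toList.length ∧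
            1 < (PySem.List.pyGetD arr 0 "").toList.length
        · rw [if_pos h2]
          by_cases h3 : overlapB pc.1.toList pc.2.toList
              (PySem.List.pyGetD arr 0 "").toList.length ≠ 0
          · rw [if_pos h3, ih]
            have hpb : pieceB pc.1.toList pc.2.toList (PySem.List.pyGetD arr 0 "").toList.length
                = [PySem.List.slice pc.2.toList
                    (some ((overlapB pc.1.toList pc.2.toList
                      (PySem.List.pyGetD arr 0 "").toList.length : Nat) : Int)) none] := by
              unfold pieceB; rw [if_neg h1, if_pos h2, if_pos h3]
            rw [hpb, List.append_assoc]
          · rw [if_neg h3, ih]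
            have hpb : pieceB pc.1.toList pc.2.toList (PySem.List.pyGetD arr 0 "").toList.length
                = [] := by
              unfold pieceB; rw [if_neg h1, if_pos h2, if_neg h3]
            rw [hpb, List.nil_append]
        · rw [if_neg h2, ih]
          have hpb : pieceB pc.1.toList pc.2.toList (PySem.List.pyGetD arr 0 "").toList.length
              = [] := by
            unfold pieceB; rw [if_neg h1, if_neg h2]
          rw [hpb, List.nil_append]
  simp only [squash_alt]
  rw [hfold, List.flatten_append, List.flatten_cons, List.flatten_nil, List.append_nil]
  refine congrArg (fun t => String.ofList ((PySem.List.pyGetD arr 0 "").toList ++ t)) ?_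
  exact flatten_flatMap _ _

theorem squash_spec' (arr : List String) (hd : Dom_squash arr) :
    squash arr = squash_alt arr := by
  rw [squash_eq_flat, squash_alt_eq_flat]
  refine congrArg (fun t => String.ofList ((PySem.List.pyGetD arr 0 "").toList ++ t)) ?_
  rw [List.flatMap_def, List.flatMap_def]
  exact congrArg List.flatten (List.map_congr_left (fun pc hpc => by
    obtain ⟨h1, h2⟩ := List.of_mem_zip hpc
    exact piece_eq _ _ _ (no_nul_of_dom hd h1) (no_nul_of_dom hd (List.mem_of_mem_tail h2))))

-- ===== VERDICT (by name: the statement is the Claim_ definition above) =====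
theorem squash_spec : Claim_equal_squash := by
  intro arr hd _hpre
  unfold Spec_squash
  exact squash_spec' arr hd
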